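-- pv_equiv track=rewrite | github.com/HappyY19/cxclipy | CxOneCli.py | should_be_excluded
-- ===== SOURCE A (Python) =====
-- def group_str_by_wildcard_character(exclusions):
--     """
--
--     Args:
--         exclusions (str): commaseparated string
--         for example, "*.min.js,readme,*.txt,test*,*doc*"
--
--     Returns:
--         dict
--         {
--          "prefix_list": ["test"], # wildcard (*) at end, but not start
--          "suffix_list": [".min.js", ".txt"],  # wildcard (*) at start, but not end
--          "inner_List": ["doc"],   # wildcard (*) at both end and start
--          "word_list": ["readme"]  # no wildcard
--         }
--     """
--     result = {
--         "prefix_list": [],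
--         "suffix_list": [],
--         "inner_List": [],
--         "word_list": [],
--     }
--     if not exclusions:
--         return result
--     string_list = exclusions.lower().split(',')
--     string_set = set(string_list)
--     for string in string_set:
--         new_string = string.strip()
--         # ignore any string that with slash or backward slash
--         if '/' in new_string or "\\" in new_string:
--             continue
--         if new_string.endswith("*") and not new_string.startswith("*"):
--             result["prefix_list"].append(new_string.rstrip("*"))
--         elif new_string.startswith("*") and not new_string.endswith("*"):
--             result["suffix_list"].append(new_string.lstrip("*"))
--         elif new_string.endswith("*") and new_string.startswith("*"):
--             result["inner_List"].append(new_string.strip("*"))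
--         else:
--             result["word_list"].append(new_string)
--     return result
--
-- def should_be_excluded(exclusions, target):
--     """
--
--     Args:
--         exclusions (str):
--         target (str):
--
--     Returns:
--
--     """
--     result = False
--     target = target.lower()
--     groups_of_exclusions = group_str_by_wildcard_character(exclusions)
--     if target.startswith(tuple(groups_of_exclusions["prefix_list"])):
--         result = True
--     if target.endswith(tuple(groups_of_exclusions["suffix_list"])):
--         result = True
--     if any([True if inner_text in target else False for inner_text in groups_of_exclusions["inner_List"]]):
--         result = True
--     if target in groups_of_exclusions["word_list"]:
--         result = True
--     return result
-- ===== SOURCE B (Python) =====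
-- def should_be_excluded(exclusions, target):
--     if not exclusions:
--         return False
--     target = target.lower()
--     for raw in exclusions.lower().split(','):
--         pattern = raw.strip()
--         if '/' in pattern or '\\' in pattern:
--             continue
--         if pattern.endswith('*') and not pattern.startswith('*'):
--             if target.startswith(pattern.rstrip('*')):
--                 return True
--         elif pattern.startswith('*') and not pattern.endswith('*'):
--             if target.endswith(pattern.lstrip('*')):
--                 return True
--         elif pattern.endswith('*'):
--             if pattern.strip('*') in target:
--                 return True
--         elif target == pattern:
--             return True
--     return False
-- ===== Notes on version B (the rewrite author's own statement) =====
-- stated objective: simpler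
-- what changed: B replaces A's two-phase structure (dedup via set, grouping every pattern into four lists, then four separate group checks) by a single early-returning pass that classifies and tests each comma-separated pattern in turn.
import Mathlib
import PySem

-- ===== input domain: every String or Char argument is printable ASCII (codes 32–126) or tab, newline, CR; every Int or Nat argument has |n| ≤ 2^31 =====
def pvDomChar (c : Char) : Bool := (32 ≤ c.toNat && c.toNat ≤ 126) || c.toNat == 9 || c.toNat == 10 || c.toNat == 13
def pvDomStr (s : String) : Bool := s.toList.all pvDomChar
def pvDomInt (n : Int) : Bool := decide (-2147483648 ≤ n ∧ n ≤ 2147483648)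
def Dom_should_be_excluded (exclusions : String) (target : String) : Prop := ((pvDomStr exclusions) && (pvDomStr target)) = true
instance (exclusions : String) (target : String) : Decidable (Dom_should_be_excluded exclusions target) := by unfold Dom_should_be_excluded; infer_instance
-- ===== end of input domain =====

-- B replaces A's build-four-lists-then-check structure (dedup set + grouping dict + four
-- separate checks) by one early-returning pass over the split patterns (objective: simpler).

-- ===== PORT A =====
-- s.rstrip("*") for the single char '*' (exact: drops every trailing '*')
def pvRstripStar (s : String) : String := String.ofList ((s.toList.reverse.dropWhile (· == '*')).reverse)
-- s.lstrip("*") (exact: drops every leading '*')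
def pvLstripStar (s : String) : String := String.ofList (s.toList.dropWhile (· == '*'))
-- s.split(',') — exact: the separator is the single nonempty char ','
def pvSplitComma (s : String) : List String :=
  (PySem.Chars.splitOn s.toList [',']).map String.ofList

-- one iteration of group_str_by_wildcard_character's for-loop, on the stripped string
-- (Python's new_string); r is the 4-tuple (prefix_list, suffix_list, inner_List, word_list)
def pvStepA (r : List String × List String × List String × List String) (s : String) :
    List String × List String × List String × List String :=
  if PySem.Str.isIn "/" (PySem.Str.strip s) || PySem.Str.isIn "\\" (PySem.Str.strip s) then r
  else if PySem.Str.endswith (PySem.Str.strip s) "*" && !PySem.Str.startswith (PySem.Str.strip s) "*" then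
    (r.1 ++ [pvRstripStar (PySem.Str.strip s)], r.2.1, r.2.2.1, r.2.2.2)
  else if PySem.Str.startswith (PySem.Str.strip s) "*" && !PySem.Str.endswith (PySem.Str.strip s) "*" then
    (r.1, r.2.1 ++ [pvLstripStar (PySem.Str.strip s)], r.2.2.1, r.2.2.2)
  else if PySem.Str.endswith (PySem.Str.strip s) "*" && PySem.Str.startswith (PySem.Str.strip s) "*" then
    (r.1, r.2.1, r.2.2.1 ++ [PySem.Str.stripChars (PySem.Str.strip s) "*"], r.2.2.2)
  else
    (r.1, r.2.1, r.2.2.1, r.2.2.2 ++ [PySem.Str.strip s])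

-- group_str_by_wildcard_character: the dict's four entries as a 4-tuple
-- (prefix_list, suffix_list, inner_List, word_list)
def group_str_by_wildcard_character (exclusions : String) :
    List String × List String × List String × List String :=
  let result : List String × List String × List String × List String := ([], [], [], [])
  if exclusions = "" then result
  else
    let string_list := pvSplitComma (PySem.Str.lower exclusions)
    let string_set := PySem.Set.ofList string_list
    string_set.foldl pvStepA result

def should_be_excluded (exclusions : String) (target : String) : Bool :=
  let result := false
  let target := PySem.Str.lower target
  let g := group_str_by_wildcard_character exclusions
  -- target.startswith(tuple(prefix_list)): true iff some element is a prefix (empty tuple → False)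
  let result := if g.1.any (fun p => PySem.Str.startswith target p) then true else result
  let result := if g.2.1.any (fun p => PySem.Str.endswith target p) then true else result
  let result := if (g.2.2.1.map (fun inner => if PySem.Str.isIn inner target then true else false)).any id then true else result
  let result := if g.2.2.2.contains target then true else result
  result

-- ===== PORT B =====
-- B's loop: test each pattern in turn, early return on the first match
def pvLoopB (t : String) : List String → Bool
  | [] => false
  | raw :: rest =>
    let p := PySem.Str.strip raw
    if PySem.Str.isIn "/" p || PySem.Str.isIn "\\" p then pvLoopB t rest
    else if PySem.Str.endswith p "*" && !PySem.Str.startswith p "*" then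
      if PySem.Str.startswith t (pvRstripStar p) then true else pvLoopB t rest
    else if PySem.Str.startswith p "*" && !PySem.Str.endswith p "*" then
      if PySem.Str.endswith t (pvLstripStar p) then true else pvLoopB t rest
    else if PySem.Str.endswith p "*" then
      if PySem.Str.isIn (PySem.Str.stripChars p "*") t then true else pvLoopB t rest
    else if t = p then true
    else pvLoopB t rest

def should_be_excluded_alt (exclusions : String) (target : String) : Bool :=
  if exclusions = "" then false
  else pvLoopB (PySem.Str.lower target) (pvSplitComma (PySem.Str.lower exclusions))

-- ===== PRECONDITION & SPEC =====
def Spec_should_be_excluded (exclusions : String) (target : String) (out : Bool) : Prop := out = should_be_excluded_alt exclusions target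
instance (exclusions : String) (target : String) (out : Bool) : Decidable (Spec_should_be_excluded exclusions target out) := by unfold Spec_should_be_excluded; infer_instance

-- ===== CLAIM (what is proved, stated in full; the proofs are below) =====
def Claim_equal_should_be_excluded : Prop := ∀ (exclusions : String) (target : String), Dom_should_be_excluded exclusions target → Spec_should_be_excluded exclusions target (should_be_excluded exclusions target)

-- ===== LEMMAS AND PROOFS =====

-- the per-pattern test both programs apply (B inline, A via the group it filed the pattern under)
def pvMatch (t : String) (raw : String) : Bool :=
  if PySem.Str.isIn "/" (PySem.Str.strip raw) || PySem.Str.isIn "\\" (PySem.Str.strip raw) then false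
  else if PySem.Str.endswith (PySem.Str.strip raw) "*" && !PySem.Str.startswith (PySem.Str.strip raw) "*" then
    PySem.Str.startswith t (pvRstripStar (PySem.Str.strip raw))
  else if PySem.Str.startswith (PySem.Str.strip raw) "*" && !PySem.Str.endswith (PySem.Str.strip raw) "*" then
    PySem.Str.endswith t (pvLstripStar (PySem.Str.strip raw))
  else if PySem.Str.endswith (PySem.Str.strip raw) "*" then
    PySem.Str.isIn (PySem.Str.stripChars (PySem.Str.strip raw) "*") t
  else decide (t = PySem.Str.strip raw)

theorem pvLoopB_eq_any (t : String) (L : List String) : pvLoopB t L = L.any (pvMatch t) := by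
  induction L with
  | nil => rfl
  | cons raw rest ih =>
    rw [List.any_cons, ← ih]
    simp only [pvLoopB, pvMatch]
    split_ifs <;> simp_all

-- A's four checks, applied to a groups tuple
def pvCheck (t : String) (g : List String × List String × List String × List String) : Bool :=
  g.1.any (fun p => PySem.Str.startswith t p) ||
  g.2.1.any (fun p => PySem.Str.endswith t p) ||
  g.2.2.1.any (fun inner => PySem.Str.isIn inner t) ||
  g.2.2.2.contains t

theorem pvOr1 (a b c d x : Bool) : ((((a || x) || b) || c) || d) = ((((a || b) || c) || d) || x) := by
  cases a <;> cases b <;> cases c <;> cases d <;> cases x <;> rfl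
theorem pvOr2 (a b c d x : Bool) : (((a || (b || x)) || c) || d) = ((((a || b) || c) || d) || x) := by
  cases a <;> cases b <;> cases c <;> cases d <;> cases x <;> rfl
theorem pvOr3 (a b c d x : Bool) : (((a || b) || (c || x)) || d) = ((((a || b) || c) || d) || x) := by
  cases a <;> cases b <;> cases c <;> cases d <;> cases x <;> rfl
theorem pvOr4 (a b c d x : Bool) : (((a || b) || c) || (d || x)) = ((((a || b) || c) || d) || x) := by
  cases a <;> cases b <;> cases c <;> cases d <;> cases x <;> rfl

theorem pvCheck_step (t s : String) (g : List String × List String × List String × List String) :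
    pvCheck t (pvStepA g s) = (pvCheck t g || pvMatch t s) := by
  rw [pvStepA, pvMatch]
  by_cases h1 : (PySem.Str.isIn "/" (PySem.Str.strip s) || PySem.Str.isIn "\\" (PySem.Str.strip s)) = true
  · rw [if_pos h1, if_pos h1, Bool.or_false]
  · rw [if_neg h1, if_neg h1]
    by_cases h2 : (PySem.Str.endswith (PySem.Str.strip s) "*" && !PySem.Str.startswith (PySem.Str.strip s) "*") = true
    · rw [if_pos h2, if_pos h2]
      simp only [pvCheck, List.any_append, List.any_cons, List.any_nil, Bool.or_false]
      exact pvOr1 _ _ _ _ _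
    · rw [if_neg h2, if_neg h2]
      by_cases h3 : (PySem.Str.startswith (PySem.Str.strip s) "*" && !PySem.Str.endswith (PySem.Str.strip s) "*") = true
      · rw [if_pos h3, if_pos h3]
        simp only [pvCheck, List.any_append, List.any_cons, List.any_nil, Bool.or_false]
        exact pvOr2 _ _ _ _ _
      · rw [if_neg h3, if_neg h3]
        by_cases h4 : (PySem.Str.endswith (PySem.Str.strip s) "*" && PySem.Str.startswith (PySem.Str.strip s) "*") = true
        · have hE : PySem.Str.endswith (PySem.Str.strip s) "*" = true := by
            cases hc : PySem.Str.endswith (PySem.Str.strip s) "*"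
            · rw [hc] at h4; simp at h4
            · rfl
          rw [if_pos h4, if_pos hE]
          simp only [pvCheck, List.any_append, List.any_cons, List.any_nil, Bool.or_false]
          exact pvOr3 _ _ _ _ _
        · have hE : ¬ PySem.Str.endswith (PySem.Str.strip s) "*" = true := by
            intro hc
            cases hs : PySem.Str.startswith (PySem.Str.strip s) "*"
            · exact h2 (by rw [hc, hs]; rfl)
            · exact h4 (by rw [hc, hs]; rfl)
          rw [if_neg h4, if_neg hE]
          have hbeq : (t == PySem.Str.strip s) = decide (t = PySem.Str.strip s) := by
            by_cases h : t = PySem.Str.strip s <;> simp [h]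
          simp only [pvCheck, List.contains_append, List.contains_cons, List.contains_nil,
            Bool.or_false, hbeq]
          exact pvOr4 _ _ _ _ _

theorem pvCheck_foldl (t : String) (L : List String)
    (g : List String × List String × List String × List String) :
    pvCheck t (L.foldl pvStepA g) = (pvCheck t g || L.any (pvMatch t)) := by
  induction L generalizing g with
  | nil => simp
  | cons s rest ih =>
    rw [List.foldl_cons, List.any_cons, ih, pvCheck_step, Bool.or_assoc]

theorem any_ofList (L : List String) (f : String → Bool) :
    (PySem.Set.ofList L).any f = L.any f := by
  cases hA : (PySem.Set.ofList L).any f <;> cases hB : L.any f <;> try rfl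
  · exfalso
    rw [List.any_eq_false] at hA
    rw [List.any_eq_true] at hB
    obtain ⟨x, hx, hfx⟩ := hB
    exact absurd hfx (by simpa using hA x (by rw [← PySem.List.dedup_eq_ofList, PySem.List.mem_dedup]; exact hx))
  · exfalso
    rw [List.any_eq_true] at hA
    rw [List.any_eq_false] at hB
    obtain ⟨x, hx, hfx⟩ := hA
    rw [← PySem.List.dedup_eq_ofList, PySem.List.mem_dedup] at hx
    exact absurd hfx (by simpa using hB x hx)

theorem should_be_excluded_eq_check (exclusions target : String) :
    should_be_excluded exclusions target =
      pvCheck (PySem.Str.lower target) (group_str_by_wildcard_character exclusions) := by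
  simp only [should_be_excluded, pvCheck]
  split_ifs <;> simp_all

theorem should_be_excluded_agree (exclusions target : String) :
    should_be_excluded exclusions target = should_be_excluded_alt exclusions target := by
  rw [should_be_excluded_eq_check]
  unfold should_be_excluded_alt group_str_by_wildcard_character
  by_cases h : exclusions = ""
  · simp [h, pvCheck]
  · simp only [if_neg h]
    rw [pvCheck_foldl, any_ofList, pvLoopB_eq_any]
    simp [pvCheck]

-- ===== VERDICT (by name: the statement is the Claim_ definition above) =====
theorem should_be_excluded_spec : Claim_equal_should_be_excluded := by
  intro e t _
  unfold Spec_should_be_excluded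
  exact should_be_excluded_agree e t
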